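-- pv_equiv track=rewrite | github.com/pradigmaz/md2docx | python/md2docx/parsers/list_handlers.py | _split_by_breaks
-- ===== SOURCE A (Python) =====
-- def _split_by_breaks(children: list) -> list:
--     """Split children list by softbreak/linebreak nodes into separate lines."""
--     lines = []
--     current_line = []
--
--     for child in children:
--         ctype = child.get("type")
--         if ctype in ["softbreak", "linebreak"]:
--             if current_line:
--                 lines.append(current_line)
--                 current_line = []
--         else:
--             current_line.append(child)
--
--     if current_line:
--         lines.append(current_line)
--
--     return lines if lines else [[]]
-- ===== SOURCE B (Python) =====
-- def _split_by_breaks(children: list) -> list: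
--     """Split children by breaks: collect break positions, then slice between consecutive cuts."""
--     n = len(children)
--     cuts = [i for i, c in enumerate(children) if c.get("type") in ("softbreak", "linebreak")]
--     lines = [children[a + 1:b] for a, b in zip([-1] + cuts, cuts + [n]) if b - a > 1]
--     return lines if lines else [[]]
-- ===== Notes on version B (the rewrite author's own statement) =====
-- stated objective: alternative
-- what changed: B is two-phase: it first collects the indices of break nodes, then slices children between consecutive break positions (zip of shifted cut lists, dropping empty segments), instead of A's single-pass current_line accumulator loop.
import Mathlib
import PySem

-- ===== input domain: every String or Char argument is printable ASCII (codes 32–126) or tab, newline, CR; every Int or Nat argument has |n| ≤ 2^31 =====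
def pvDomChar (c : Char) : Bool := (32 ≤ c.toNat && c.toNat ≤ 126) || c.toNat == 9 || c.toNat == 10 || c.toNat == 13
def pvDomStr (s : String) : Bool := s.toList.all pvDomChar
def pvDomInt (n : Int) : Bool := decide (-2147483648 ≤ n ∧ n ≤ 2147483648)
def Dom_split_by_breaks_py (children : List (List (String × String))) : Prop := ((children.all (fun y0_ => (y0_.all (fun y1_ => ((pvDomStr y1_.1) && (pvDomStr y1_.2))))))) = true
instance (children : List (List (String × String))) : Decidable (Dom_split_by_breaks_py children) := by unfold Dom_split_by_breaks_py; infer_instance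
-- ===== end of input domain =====

-- B replaces A's single-pass current_line accumulator with a two-phase index computation:
-- collect the break positions, then slice children between consecutive cuts (objective: alternative).

-- ===== PORT A =====
-- the loop over children with state (lines, current_line), then the trailing flush
def pvLoopA (cs : List (List (String × String)))
    (lines : List (List (List (String × String))))
    (cur : List (List (String × String))) : List (List (List (String × String))) :=
  match cs with
  | [] => if cur ≠ [] then lines ++ [cur] else lines
  | c :: rest =>
    let ctype := c.lookup "type"          -- child.get("type"): first-match lookup in the assoc list
    if ctype = some "softbreak" ∨ ctype = some "linebreak" then
      if cur ≠ [] then pvLoopA rest (lines ++ [cur]) []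
      else pvLoopA rest lines cur
    else
      pvLoopA rest lines (cur ++ [c])

def split_by_breaks_py (children : List (List (String × String))) : List (List (List (String × String))) :=
  let lines := pvLoopA children [] []
  if lines ≠ [] then lines else [[]]

-- ===== PORT B =====
def pvIsBreak (c : List (String × String)) : Bool :=
  c.lookup "type" == some "softbreak" || c.lookup "type" == some "linebreak"

def split_by_breaks_py_alt (children : List (List (String × String))) : List (List (List (String × String))) :=
  let n : Int := children.length
  -- cuts = [i for i, c in enumerate(children) if is-break(c)]
  let cuts : List Int := ((PySem.List.enumerate children).filter (fun p => pvIsBreak p.2)).map (fun p => p.1)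
  -- lines = [children[a+1:b] for a, b in zip([-1] + cuts, cuts + [n]) if b - a > 1]
  let lines := ((List.zip ((-1) :: cuts) (cuts ++ [n])).filter (fun ab => 1 < ab.2 - ab.1)).map
      (fun ab => PySem.List.slice children (some (ab.1 + 1)) (some ab.2))
  if lines = [] then [[]] else lines

-- ===== PRECONDITION & SPEC =====
def Spec_split_by_breaks_py (children : List (List (String × String))) (out : List (List (List (String × String)))) : Prop := out = split_by_breaks_py_alt children
instance (children : List (List (String × String))) (out : List (List (List (String × String)))) : Decidable (Spec_split_by_breaks_py children out) := by unfold Spec_split_by_breaks_py; infer_instance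

-- ===== CLAIM (what is proved, stated in full; the proofs are below) =====
def Claim_equal_split_by_breaks_py : Prop := ∀ (children : List (List (String × String))), Dom_split_by_breaks_py children → Spec_split_by_breaks_py children (split_by_breaks_py children)

-- ===== LEMMAS AND PROOFS =====

-- canonical middle form: the maximal non-break runs, extracted by takeWhile/dropWhile
def pvGroups (cs : List (List (String × String))) : List (List (List (String × String))) :=
  match cs with
  | [] => []
  | c :: rest =>
    if pvIsBreak c then pvGroups rest
    else (c :: rest.takeWhile (fun x => !pvIsBreak x)) ::
         pvGroups (rest.dropWhile (fun x => !pvIsBreak x))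
termination_by cs.length
decreasing_by
  · simp
  · simpa using Nat.lt_succ_of_le (List.length_dropWhile_le _ rest)

-- A-side: pvLoopA with a pending partial line `cur` prepended to the first group
def pvGroupsAux (cs : List (List (String × String)))
    (cur : List (List (String × String))) : List (List (List (String × String))) :=
  if cur = [] then pvGroups cs
  else (cur ++ cs.takeWhile (fun x => !pvIsBreak x)) ::
       pvGroups (cs.dropWhile (fun x => !pvIsBreak x))

lemma pvIsBreak_iff (c : List (String × String)) :
    pvIsBreak c = true ↔ (c.lookup "type" = some "softbreak" ∨ c.lookup "type" = some "linebreak") := by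
  simp [pvIsBreak]

lemma pvLoopA_eq_groupsAux (cs : List (List (String × String)))
    (lines : List (List (List (String × String))))
    (cur : List (List (String × String))) :
    pvLoopA cs lines cur = lines ++ pvGroupsAux cs cur := by
  induction cs generalizing lines cur with
  | nil =>
    simp only [pvLoopA, pvGroupsAux]
    by_cases h : cur = [] <;> simp [h, pvGroups]
  | cons c rest ih =>
    simp only [pvLoopA]
    by_cases hb : c.lookup "type" = some "softbreak" ∨ c.lookup "type" = some "linebreak"
    · have hb' : pvIsBreak c = true := (pvIsBreak_iff c).mpr hb
      simp only [if_pos hb]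
      by_cases hc : cur = []
      · simp only [hc, ne_eq, not_true_eq_false, if_false, ih]
        simp [pvGroupsAux, pvGroups, hb']
      · simp only [ne_eq, hc, not_false_eq_true, if_true, ih]
        have h1 : pvGroupsAux rest [] = pvGroups rest := by simp [pvGroupsAux]
        have h2 : pvGroupsAux (c :: rest) cur
            = (cur ++ (c :: rest).takeWhile (fun x => !pvIsBreak x)) ::
              pvGroups ((c :: rest).dropWhile (fun x => !pvIsBreak x)) := by
          simp [pvGroupsAux, hc]
        rw [h1, h2, List.takeWhile_cons, List.dropWhile_cons]
        simp [hb', pvGroups]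
    · have hb' : pvIsBreak c = false := by
        rw [← Bool.not_eq_true, pvIsBreak_iff]; exact hb
      simp only [if_neg hb, ih]
      congr 1
      by_cases hc : cur = []
      · simp [pvGroupsAux, hc, pvGroups, hb']
      · have hcc : cur ++ [c] ≠ [] := by simp
        simp only [pvGroupsAux, if_neg hc, if_neg hcc,
          List.takeWhile_cons, List.dropWhile_cons, hb']
        simp

lemma pvLoopA_eq_groups (cs : List (List (String × String))) :
    pvLoopA cs [] [] = pvGroups cs := by
  rw [pvLoopA_eq_groupsAux]; simp [pvGroupsAux]

-- B-side middle form over Nat indices: break positions, consecutive (start, stop) pairs, segments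
def pvCutsN : List (List (String × String)) → List Nat
  | [] => []
  | c :: rest => if pvIsBreak c then 0 :: (pvCutsN rest).map (·+1) else (pvCutsN rest).map (·+1)

def pvPairs : Nat → List Nat → Nat → List (Nat × Nat)
  | s, [], n => [(s, n)]
  | s, k :: ks, n => (s, k) :: pvPairs (k+1) ks n

def pvSeg (cs : List (List (String × String))) (p : Nat × Nat) : List (List (String × String)) :=
  (cs.drop p.1).take (p.2 - p.1)

def pvShift (p : Nat × Nat) : Nat × Nat := (p.1 + 1, p.2 + 1)

def pvNLines (cs : List (List (String × String))) : List (List (List (String × String))) :=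
  ((pvPairs 0 (pvCutsN cs) cs.length).filter (fun p => p.1 < p.2)).map (pvSeg cs)

lemma pvPairs_shift (ks : List Nat) : ∀ (s n : Nat),
    pvPairs (s+1) (ks.map (·+1)) (n+1) = (pvPairs s ks n).map pvShift := by
  induction ks with
  | nil => intro s n; simp [pvPairs, pvShift]
  | cons k ks ih => intro s n; simp [pvPairs, pvShift, ih]

lemma pvShift_lines (y : List (String × String)) (cs : List (List (String × String)))
    (ps : List (Nat × Nat)) :
    ((ps.map pvShift).filter (fun p => p.1 < p.2)).map (pvSeg (y :: cs))
      = (ps.filter (fun p => p.1 < p.2)).map (pvSeg cs) := by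
  rw [List.filter_map]
  have hp : ((fun p : Nat × Nat => decide (p.1 < p.2)) ∘ pvShift)
      = (fun p : Nat × Nat => decide (p.1 < p.2)) := by
    funext p; simp [pvShift]
  rw [hp, List.map_map]
  have hs : (pvSeg (y :: cs)) ∘ pvShift = pvSeg cs := by
    funext p; simp [pvSeg, pvShift, Nat.add_sub_add_right]
  rw [hs]

lemma pvNLines_break {c : List (String × String)} (rest : List (List (String × String)))
    (hc : pvIsBreak c = true) : pvNLines (c :: rest) = pvNLines rest := by
  simp only [pvNLines, pvCutsN, hc, if_true, List.length_cons, pvPairs]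
  rw [pvPairs_shift]
  simp [pvShift_lines]

-- cons a non-break head onto the first line
lemma pvNLines_cc {c d : List (String × String)} (rest' : List (List (String × String)))
    (hc : pvIsBreak c = false) (hd : pvIsBreak d = false) (L : List (List (String × String)))
    (Ls : List (List (List (String × String))))
    (hL : pvNLines (d :: rest') = L :: Ls) :
    pvNLines (c :: d :: rest') = (c :: L) :: Ls := by
  cases hu : pvCutsN rest' with
  | nil =>
    have h1 : pvNLines (d :: rest') = [d :: rest'] := by
      simp [pvNLines, pvCutsN, hd, hu, pvPairs, pvSeg, List.take_length]
    rw [h1] at hL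
    obtain ⟨h2, h3⟩ := List.cons_eq_cons.mp hL
    subst h2; subst h3
    simp [pvNLines, pvCutsN, hc, hd, hu, pvPairs, pvSeg, List.take_succ_cons,
      List.take_length]
  | cons k u' =>
    have hP : pvNLines (d :: rest')
        = pvSeg (d :: rest') (0, k + 1) ::
          ((pvPairs (k + 1 + 1) (u'.map (·+1)) (rest'.length + 1)).filter
            (fun p => p.1 < p.2)).map (pvSeg (d :: rest')) := by
      simp only [pvNLines, pvCutsN, hd, Bool.false_eq_true, if_false, hu, List.map_cons,
        List.length_cons, pvPairs]
      rw [List.filter_cons_of_pos (by simp)]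
      simp
    have hC : pvNLines (c :: d :: rest')
        = (c :: pvSeg (d :: rest') (0, k + 1)) ::
          ((pvPairs (k + 1 + 1) (u'.map (·+1)) (rest'.length + 1)).filter
            (fun p => p.1 < p.2)).map (pvSeg (d :: rest')) := by
      simp only [pvNLines, pvCutsN, hc, hd, Bool.false_eq_true, if_false, hu, List.map_cons,
        List.length_cons, pvPairs]
      rw [pvPairs_shift, List.filter_cons_of_pos (by simp)]
      rw [List.map_cons, pvShift_lines]
      congr 1
    rw [hP] at hL
    obtain ⟨h2, h3⟩ := List.cons_eq_cons.mp hL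
    subst h2; subst h3
    exact hC

lemma pvNLines_nb (rest : List (List (String × String))) :
    ∀ (c : List (String × String)), pvIsBreak c = false →
    pvNLines (c :: rest) = (c :: rest.takeWhile (fun x => !pvIsBreak x)) ::
      pvNLines (rest.dropWhile (fun x => !pvIsBreak x)) := by
  induction rest with
  | nil =>
    intro c hc
    simp [pvNLines, pvCutsN, hc, pvPairs, pvSeg]
  | cons d rest' ih =>
    intro c hc
    by_cases hd : pvIsBreak d
    · have hlhs : pvNLines (c :: d :: rest') = [c] :: pvNLines rest' := by
        simp only [pvNLines, pvCutsN, hc, Bool.false_eq_true, if_false, hd, if_true,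
          List.map_cons, List.length_cons, pvPairs]
        rw [pvPairs_shift, pvPairs_shift, List.filter_cons_of_pos (by simp)]
        rw [List.map_cons, pvShift_lines, pvShift_lines]
        congr 1
      rw [hlhs]
      simp only [List.takeWhile_cons, List.dropWhile_cons, hd]
      simp [pvNLines_break rest' hd]
    · have hd' : pvIsBreak d = false := by simpa using hd
      have h := pvNLines_cc rest' hc hd' _ _ (ih d hd')
      rw [h]
      simp [hd']

lemma pvNLines_eq_groups_fuel (n : Nat) :
    ∀ (cs : List (List (String × String))), cs.length ≤ n → pvNLines cs = pvGroups cs := by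
  induction n with
  | zero =>
    intro cs h
    have : cs = [] := List.length_eq_zero_iff.mp (Nat.le_zero.mp h)
    subst this
    simp [pvNLines, pvCutsN, pvPairs, pvGroups]
  | succ n ih =>
    intro cs h
    match cs with
    | [] => simp [pvNLines, pvCutsN, pvPairs, pvGroups]
    | c :: rest =>
      by_cases hc : pvIsBreak c
      · rw [pvNLines_break rest hc]
        rw [show pvGroups (c :: rest) = pvGroups rest by rw [pvGroups]; simp [hc]]
        exact ih rest (by simpa using h)
      · have hc' : pvIsBreak c = false := by simpa using hc
        rw [pvNLines_nb rest c hc']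
        rw [show pvGroups (c :: rest)
            = (c :: rest.takeWhile (fun x => !pvIsBreak x)) ::
              pvGroups (rest.dropWhile (fun x => !pvIsBreak x)) by
          rw [pvGroups]; simp [hc']]
        congr 1
        exact ih _ (le_trans (List.length_dropWhile_le _ rest) (by simpa using h))

lemma pvNLines_eq_groups (cs : List (List (String × String))) :
    pvNLines cs = pvGroups cs :=
  pvNLines_eq_groups_fuel cs.length cs le_rfl

-- Int bridge: the enumerate/filter/map cut list is the Nat cut list, cast
lemma pvCuts_int (cs : List (List (String × String))) : ∀ (s : Nat),
    ((PySem.List.enumerate cs (s : Int)).filter (fun p => pvIsBreak p.2)).map (fun p => p.1)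
      = (pvCutsN cs).map (fun k => ((k + s : Nat) : Int)) := by
  induction cs with
  | nil => intro s; simp [PySem.List.enumerate_nil, pvCutsN]
  | cons c rest ih =>
    intro s
    rw [PySem.List.enumerate_cons]
    have hcast : ((s : Int) + 1) = (((s + 1 : Nat)) : Int) := by push_cast; ring
    by_cases hc : pvIsBreak c
    · rw [List.filter_cons_of_pos (by simpa using hc), List.map_cons, hcast, ih (s + 1)]
      simp only [pvCutsN, hc, if_true, List.map_cons, List.map_map]
      congr 1
      · congr 1; omega
      · apply List.map_congr_left; intro k _; simp only [Function.comp]; congr 1; omega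
    · rw [List.filter_cons_of_neg (by simpa using hc), hcast, ih (s + 1)]
      simp only [pvCutsN, hc, Bool.false_eq_true, if_false, List.map_map]
      apply List.map_congr_left; intro k _; simp only [Function.comp]; congr 1; omega

-- Int bridge: the zip of shifted cut lists is pvPairs, cast
lemma pvZip_int (ks : List Nat) : ∀ (a n : Nat),
    List.zip (((a : Int) - 1) :: ks.map (fun k : Nat => (k : Int))) (ks.map (fun k : Nat => (k : Int)) ++ [(n : Int)])
      = (pvPairs a ks n).map (fun p => ((p.1 : Int) - 1, (p.2 : Int))) := by
  induction ks with
  | nil => intro a n; simp [pvPairs]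
  | cons k ks ih =>
    intro a n
    rw [List.map_cons, List.cons_append, List.zip_cons_cons]
    rw [show pvPairs a (k :: ks) n = (a, k) :: pvPairs (k + 1) ks n from rfl]
    rw [List.map_cons]
    refine congrArg₂ List.cons rfl ?_
    have hk := ih (k + 1) n
    rw [show (((k + 1 : Nat)) : Int) - 1 = (k : Int) from by push_cast; ring] at hk
    exact hk

lemma pvAlt_eq_nlines (children : List (List (String × String))) :
    split_by_breaks_py_alt children
      = if pvNLines children = [] then [[]] else pvNLines children := by
  have hcuts : ((PySem.List.enumerate children).filter (fun p => pvIsBreak p.2)).map (fun p => p.1)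
      = (pvCutsN children).map (fun k : Nat => (k : Int)) := by
    have h0 : (0 : Int) = ((0 : Nat) : Int) := by norm_num
    rw [show PySem.List.enumerate children = PySem.List.enumerate children ((0 : Nat) : Int) by
      rw [← h0]]
    rw [pvCuts_int children 0]
    apply List.map_congr_left; intro k _; norm_num
  have hzip : List.zip ((-1 : Int) :: (pvCutsN children).map (fun k : Nat => (k : Int)))
        ((pvCutsN children).map (fun k : Nat => (k : Int)) ++ [(children.length : Int)])
      = (pvPairs 0 (pvCutsN children) children.length).map
          (fun p => ((p.1 : Int) - 1, (p.2 : Int))) := by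
    have h1 : (-1 : Int) = ((0 : Nat) : Int) - 1 := by norm_num
    rw [h1, pvZip_int]
  have hpred : ((fun ab : Int × Int => decide (1 < ab.2 - ab.1)) ∘
        (fun p : Nat × Nat => ((p.1 : Int) - 1, (p.2 : Int))))
      = (fun p : Nat × Nat => decide (p.1 < p.2)) := by
    funext p
    simp only [Function.comp_apply, decide_eq_decide]
    omega
  have hseg : ((fun ab : Int × Int => PySem.List.slice children (some (ab.1 + 1)) (some ab.2)) ∘
        (fun p : Nat × Nat => ((p.1 : Int) - 1, (p.2 : Int))))
      = pvSeg children := by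
    funext p
    simp only [Function.comp_apply]
    rw [show ((p.1 : Int) - 1 + 1) = ((p.1 : Nat) : Int) by ring]
    rw [PySem.List.slice_natCast]
    rfl
  unfold split_by_breaks_py_alt
  dsimp only
  rw [hcuts, hzip, List.filter_map, hpred, List.map_map, hseg]
  rfl

-- ===== VERDICT (by name: the statement is the Claim_ definition above) =====
theorem split_by_breaks_py_spec : Claim_equal_split_by_breaks_py := by
  intro children _
  unfold Spec_split_by_breaks_py split_by_breaks_py
  rw [pvLoopA_eq_groups, pvAlt_eq_nlines, pvNLines_eq_groups]
  by_cases h : pvGroups children = [] <;> simp [h]
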